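/- GENERATED by c/gen_decode.py: decode facts of the image, one per distinct instruction byte string. -/
import UserX.DecodeImage

#decode_all Vorbis.Dec
  "0f28ef"  -- movaps xmm5,xmm7
  "0f8483000000"  -- je 119b92
  "0f852afdffff"  -- jne 11469f
  "0f8c4fffffff"  -- jl 1154e9
  "0f8fec000000"  -- jg 113e1b
  "0fb6e9"  -- movzx ebp,cl
  "39da"  -- cmp edx,ebx
  "410fb64c1f31"  -- movzx ecx,BYTE PTR [r15+rbx*1+0x31]
  "41803e00"  -- cmp BYTE PTR [r14],0x0
  "41895e14"  -- mov DWORD PTR [r14+0x14],ebx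
  "418b8670050000"  -- mov eax,DWORD PTR [r14+0x570]
  "41c7870000c00000000000"  -- mov DWORD PTR [r15+0xc00000],0x0
  "440fb66500"  -- movzx r12d,BYTE PTR [rbp+0x0]
  "443b23"  -- cmp r12d,DWORD PTR [rbx]
  "448975b0"  -- mov DWORD PTR [rbp-0x50],r14d
  "448b3c24"  -- mov r15d,DWORD PTR [rsp]
  "448bb56cffffff"  -- mov r14d,DWORD PTR [rbp-0x94]
  "4584ed"  -- test r13b,r13b
  "458b6e04"  -- mov r13d,DWORD PTR [r14+0x4]
  "48039d38010000"  -- add rbx,QWORD PTR [rbp+0x138]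
  "4863b59c000000"  -- movsxd rsi,DWORD PTR [rbp+0x9c]
  "4883c318"  -- add rbx,0x18
  "48894c2418"  -- mov QWORD PTR [rsp+0x18],rcx
  "4889fb"  -- mov rbx,rdi
  "488b7c2430"  -- mov rdi,QWORD PTR [rsp+0x30]
  "488d4301"  -- lea rax,[rbx+0x1]
  "488d7bd4"  -- lea rdi,[rbx-0x2c]
  "488daba8000000"  -- lea rbp,[rbx+0xa8]
  "488dbcc3a8050000"  -- lea rdi,[rbx+rax*8+0x5a8]
  "48c1e504"  -- shl rbp,0x4
  "490337"  -- add rsi,QWORD PTR [r15]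
  "4983c401"  -- add r12,0x1
  "498d1c8c"  -- lea rbx,[r12+rcx*4]
  "498d7e20"  -- lea rdi,[r14+0x20]
  "49c7853800c00000000000"  -- mov QWORD PTR [r13+0xc00038],0x0
  "4b8d043f"  -- lea rax,[r15+r15*1]
  "4c63f3"  -- movsxd r14,ebx
  "4c8b0c2538f01f00"  -- mov r9,QWORD PTR ds:0x1ff038
  "4c8d341b"  -- lea r14,[rbx+rbx*1]
  "4d63e6"  -- movsxd r12,r14d
  "4d8dbc248c000000"  -- lea r15,[r12+0x8c]
  "660f57052ddb0100"  -- xorpd xmm0,XMMWORD PTR [rip+0x1db2d]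
  "6641837c6f0400"  -- cmp WORD PTR [r15+rbp*2+0x4],0x0
  "7225"  -- jb 102cdc
  "7455"  -- je 119bb9
  "7558"  -- jne 119793
  "7c03"  -- jl 10726a
  "7e77"  -- jle 10e691
  "80bf0000c00000"  -- cmp BYTE PTR [rdi+0xc00000],0x0
  "83c320"  -- add ebx,0x20
  "89442428"  -- mov DWORD PTR [rsp+0x28],eax
  "898d38ffffff"  -- mov DWORD PTR [rbp-0xc8],ecx
  "8b442414"  -- mov eax,DWORD PTR [rsp+0x14]
  "8b742440"  -- mov esi,DWORD PTR [rsp+0x40]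
  "8d348500000000"  -- lea esi,[rax*4+0x0]
  "be02000000"  -- mov esi,0x2
  "c684244101000001"  -- mov BYTE PTR [rsp+0x141],0x1
  "c7839c00c000f3f3f3f3"  -- mov DWORD PTR [rbx+0xc0009c],0xf3f3f3f3
  "e803f4feff"  -- call 100720
  "e80d70ffff"  -- call 100640
  "e8181bffff"  -- call 100300
  "e82141ffff"  -- call 100800
  "e82af7ffff"  -- call 100059
  "e8338dffff"  -- call 10d1c0
  "e83f2affff"  -- call 100800
  "e848cdffff"  -- call 108f20
  "e853f2ffff"  -- call 101d00
  "e860ecfeff"  -- call 100640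
  "e86cbfffff"  -- call 105740
  "e877f3feff"  -- call 100480
  "e88352ffff"  -- call 100640
  "e88e68ffff"  -- call 100640
  "e897aafeff"  -- call 1008e0
  "e8a184ffff"  -- call 104c60
  "e8acb8ffff"  -- call 100720
  "e8b5bafeff"  -- call 100720
  "e8bff1feff"  -- call 1003c0
  "e8c9d3feff"  -- call 100640
  "e8d4b7feff"  -- call 100640
  "e8df65ffff"  -- call 100640
  "e8e80cffff"  -- call 103d00
  "e8efbcfeff"  -- call 100640
  "e8fad9feff"  -- call 103d00
  "e927faffff"  -- jmp 110e7e
  "e96bffffff"  -- jmp 104152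
  "e9c6feffff"  -- jmp 115db9
  "eb1b"  -- jmp 100d83
  "ebac"  -- jmp 103230
  "f20f100d41d50100"  -- movsd xmm1,QWORD PTR [rip+0x1d541]
  "f20f59157bda0100"  -- mulsd xmm2,QWORD PTR [rip+0x1da7b]
  "f2480f2ac8"  -- cvtsi2sd xmm1,rax
  "f30f105dbc"  -- movss xmm3,DWORD PTR [rbp-0x44]
  "f30f112c24"  -- movss DWORD PTR [rsp],xmm5
  "f30f115db0"  -- movss DWORD PTR [rbp-0x50],xmm3
  "f30f580c24"  -- addss xmm1,DWORD PTR [rsp]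
  "f30f594b10"  -- mulss xmm1,DWORD PTR [rbx+0x10]
  "f30f5cca"  -- subss xmm1,xmm2
  "f3410f110e"  -- movss DWORD PTR [r14],xmm1
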